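-- pv_equiv track=rewrite | github.com/nathanrobertbaldwin/leetcode | 12-16-2023-bob-and-indices.py | bobAndIndices
-- ===== SOURCE A (Python) =====
-- def bobAndIndices(a, b, c):
--     aDict = {}
--
--     for i in range(0, len(a)):
--         if a[i] in aDict:
--             aDict[a[i]] += 1
--         else:
--             aDict[a[i]] = 1
--
--     findInA = []
--
--     for j in range(0, len(c)):
--         findInA.append(b[c[j]])
--
--     count = 0
--
--     for k in range(0, len(findInA)):
--         if findInA[k] in aDict:
--             count += aDict[findInA[k]]
--
--     return count
-- ===== SOURCE B (Python) =====
-- def _boundary(s, pred):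
--     # first index j in sorted s with not pred(s[j]) (pred is prefix-closed), by binary search
--     lo, hi = 0, len(s)
--     while lo < hi:
--         mid = (lo + hi) // 2
--         if pred(s[mid]):
--             lo = mid + 1
--         else:
--             hi = mid
--     return lo
--
--
-- def bobAndIndices(a, b, c):
--     s = sorted(a)
--     total = 0
--     for i in c:
--         v = b[i]
--         total += _boundary(s, lambda x: x <= v) - _boundary(s, lambda x: x < v)
--     return total
-- ===== Notes on version B (the rewrite author's own statement) =====
-- stated objective: alternative
-- what changed: Replaces the build-frequency-dict-then-lookup three-loop approach with sort-then-binary-search: a is sorted once and each selected value b[i] is counted as the difference of two binary-search boundaries in the sorted copy.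
import Mathlib
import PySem

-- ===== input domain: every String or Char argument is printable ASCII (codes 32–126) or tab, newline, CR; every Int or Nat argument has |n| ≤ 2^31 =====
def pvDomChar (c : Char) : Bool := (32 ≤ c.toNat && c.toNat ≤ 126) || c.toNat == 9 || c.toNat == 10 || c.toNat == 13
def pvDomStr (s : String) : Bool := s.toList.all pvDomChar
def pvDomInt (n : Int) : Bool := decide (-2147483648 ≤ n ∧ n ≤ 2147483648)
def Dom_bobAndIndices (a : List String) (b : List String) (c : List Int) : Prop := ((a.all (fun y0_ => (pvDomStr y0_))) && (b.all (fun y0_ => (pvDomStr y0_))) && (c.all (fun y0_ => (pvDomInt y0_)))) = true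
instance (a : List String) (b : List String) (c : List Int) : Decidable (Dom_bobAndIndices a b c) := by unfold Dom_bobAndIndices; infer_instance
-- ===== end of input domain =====

-- B replaces A's build-frequency-dict-then-lookup three-loop approach with sort-then-binary-search:
-- a is sorted once, each selected value b[i] is counted as the difference of two binary-search boundaries (alternative algorithm).

-- ===== PORT A =====
def bobAndIndices (a : List String) (b : List String) (c : List Int) : Int :=
  let aDict : PySem.Dict String Int :=
    (PySem.List.pyRange 0 (a.length : Int) 1).foldl
      (fun d i =>
        if d.contains (PySem.List.pyGetD a i "") then
          d.insert (PySem.List.pyGetD a i "") (d.getD (PySem.List.pyGetD a i "") 0 + 1)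
        else
          d.insert (PySem.List.pyGetD a i "") 1)
      PySem.Dict.empty
  let findInA : List String :=
    (PySem.List.pyRange 0 (c.length : Int) 1).foldl
      (fun acc j => acc ++ [PySem.List.pyGetD b (PySem.List.pyGetD c j 0) ""])
      []
  (PySem.List.pyRange 0 (findInA.length : Int) 1).foldl
    (fun cnt k =>
      if aDict.contains (PySem.List.pyGetD findInA k "") then
        cnt + aDict.getD (PySem.List.pyGetD findInA k "") 0
      else cnt)
    0

-- ===== PORT B =====
-- port of Source B's _boundary: binary search for the first index whose element fails `pred`
-- (hand-written in Source B, hence ported step for step; pyGetD is exact since 0 ≤ mid < len s at each probe)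
def pvBoundary (s : List String) (pred : String → Bool) (lo hi : Int) : Int :=
  if h : lo < hi then
    let mid := PySem.Int.floordiv (lo + hi) 2
    if pred (PySem.List.pyGetD s mid "") then pvBoundary s pred (mid + 1) hi
    else pvBoundary s pred lo mid
  else lo
termination_by (hi - lo).toNat
decreasing_by
  · have h1 := PySem.Int.floordiv_two_mid_bounds (le_of_lt h)
    have h2 : PySem.Int.floordiv (lo + hi) 2 < hi :=
      (PySem.Int.floordiv_lt_iff_lt_mul (by norm_num)).mpr (by omega)
    omega
  · have h1 := PySem.Int.floordiv_two_mid_bounds (le_of_lt h)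
    have h2 : PySem.Int.floordiv (lo + hi) 2 < hi :=
      (PySem.Int.floordiv_lt_iff_lt_mul (by norm_num)).mpr (by omega)
    omega

def bobAndIndices_alt (a : List String) (b : List String) (c : List Int) : Int :=
  let s := PySem.List.sorted a (fun x => x)
  c.foldl
    (fun total i =>
      let v := PySem.List.pyGetD b i ""
      total + (pvBoundary s (fun x => decide (x ≤ v)) 0 (s.length : Int)
               - pvBoundary s (fun x => decide (x < v)) 0 (s.length : Int)))
    0

-- ===== PRECONDITION & SPEC =====
-- Pre_ excludes exactly the inputs where Python A (and B alike) raise IndexError: some index in c out of range for b.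
def Pre_bobAndIndices (a : List String) (b : List String) (c : List Int) : Prop :=
  ∀ i ∈ c, PySem.Raise.InRange b.length i
instance (a : List String) (b : List String) (c : List Int) : Decidable (Pre_bobAndIndices a b c) := by unfold Pre_bobAndIndices; infer_instance
def pvWitness_bobAndIndices : List String × List String × List Int := (["x", "y", "x"], ["x", "z"], [0, -1, 1])

def Spec_bobAndIndices (a : List String) (b : List String) (c : List Int) (out : Int) : Prop := out = bobAndIndices_alt a b c
instance (a : List String) (b : List String) (c : List Int) (out : Int) : Decidable (Spec_bobAndIndices a b c out) := by unfold Spec_bobAndIndices; infer_instance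

-- ===== CLAIM (what is proved, stated in full; the proofs are below) =====
def Claim_equal_bobAndIndices : Prop := ∀ (a : List String) (b : List String) (c : List Int), Dom_bobAndIndices a b c → Pre_bobAndIndices a b c → Spec_bobAndIndices a b c (bobAndIndices a b c)

-- ===== LEMMAS AND PROOFS =====

-- A's dict-building step equals the canonical counter step.
lemma dict_step_eq (d : PySem.Dict String Int) (x : String) :
    (if d.contains x then d.insert x (d.getD x 0 + 1) else d.insert x 1)
      = d.insert x (d.getD x 0 + 1) := by
  by_cases h : d.contains x = true
  · simp [h]
  · simp only [Bool.not_eq_true] at h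
    rw [if_neg (by simp [h]), PySem.Dict.getD_of_not_contains d 0 h]; norm_num

-- each step of A's final loop adds the count of the element in a
lemma term_eq (a : List String) (cnt : Int) (v : String) :
    (if (PySem.Dict.counter a).contains v then cnt + (PySem.Dict.counter a).getD v 0 else cnt)
      = cnt + (PySem.List.count a v : Int) := by
  by_cases h : v ∈ a
  · simp [PySem.Dict.contains_counter, h, PySem.Dict.getD_counter, PySem.List.count]
  · simp [PySem.Dict.contains_counter, h, PySem.List.count, List.count_eq_zero_of_not_mem h]

-- A computes the sum over c of a.count(b[i]).
lemma a_eq_foldl_count (a : List String) (b : List String) (c : List Int) :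
    bobAndIndices a b c
      = c.foldl (fun acc i => acc + (PySem.List.count a (PySem.List.pyGetD b i "") : Int)) 0 := by
  show (PySem.List.pyRange 0
      ((((PySem.List.pyRange 0 (c.length : Int) 1).foldl
          (fun acc j => acc ++ [PySem.List.pyGetD b (PySem.List.pyGetD c j 0) ""]) ([] : List String)).length : Int)) 1).foldl
      (fun cnt k =>
        if ((PySem.List.pyRange 0 (a.length : Int) 1).foldl
            (fun (d : PySem.Dict String Int) i =>
              if d.contains (PySem.List.pyGetD a i "") then
                d.insert (PySem.List.pyGetD a i "") (d.getD (PySem.List.pyGetD a i "") 0 + 1)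
              else
                d.insert (PySem.List.pyGetD a i "") 1)
            PySem.Dict.empty).contains
            (PySem.List.pyGetD ((PySem.List.pyRange 0 (c.length : Int) 1).foldl
              (fun acc j => acc ++ [PySem.List.pyGetD b (PySem.List.pyGetD c j 0) ""]) ([] : List String)) k "") then
          cnt + ((PySem.List.pyRange 0 (a.length : Int) 1).foldl
            (fun (d : PySem.Dict String Int) i =>
              if d.contains (PySem.List.pyGetD a i "") then
                d.insert (PySem.List.pyGetD a i "") (d.getD (PySem.List.pyGetD a i "") 0 + 1)
              else
                d.insert (PySem.List.pyGetD a i "") 1)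
            PySem.Dict.empty).getD
            (PySem.List.pyGetD ((PySem.List.pyRange 0 (c.length : Int) 1).foldl
              (fun acc j => acc ++ [PySem.List.pyGetD b (PySem.List.pyGetD c j 0) ""]) ([] : List String)) k "") 0
        else cnt) 0
    = c.foldl (fun acc i => acc + (PySem.List.count a (PySem.List.pyGetD b i "") : Int)) 0
  have h1 : (PySem.List.pyRange 0 (a.length : Int) 1).foldl
      (fun (d : PySem.Dict String Int) i =>
        if d.contains (PySem.List.pyGetD a i "") then
          d.insert (PySem.List.pyGetD a i "") (d.getD (PySem.List.pyGetD a i "") 0 + 1)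
        else
          d.insert (PySem.List.pyGetD a i "") 1)
      PySem.Dict.empty = PySem.Dict.counter a :=
    (PySem.List.foldl_congr_mem _ _
        (fun (d : PySem.Dict String Int) i =>
          d.insert (PySem.List.pyGetD a i "") (d.getD (PySem.List.pyGetD a i "") 0 + 1))
        PySem.Dict.empty
        (fun acc i _ => dict_step_eq acc (PySem.List.pyGetD a i ""))).trans
      ((PySem.List.foldl_pyRange_zero_pyGetD' a ""
          (fun (d : PySem.Dict String Int) x => d.insert x (d.getD x 0 + 1))
          PySem.Dict.empty).trans
        (PySem.Dict.foldl_insert_getD_add_one_eq_counter a))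
  have h2 : (PySem.List.pyRange 0 (c.length : Int) 1).foldl
      (fun acc j => acc ++ [PySem.List.pyGetD b (PySem.List.pyGetD c j 0) ""]) ([] : List String)
      = c.map (fun i => PySem.List.pyGetD b i "") :=
    (PySem.List.foldl_pyRange_zero_pyGetD' c 0
        (fun acc x => acc ++ [PySem.List.pyGetD b x ""]) []).trans
      ((PySem.List.foldl_append_singleton_eq_map (fun i => PySem.List.pyGetD b i "") c []).trans
        (List.nil_append _))
  rw [h1, h2]
  exact (PySem.List.foldl_pyRange_zero_pyGetD' (c.map fun i => PySem.List.pyGetD b i "") ""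
      (fun cnt v =>
        if (PySem.Dict.counter a).contains v then cnt + (PySem.Dict.counter a).getD v 0 else cnt) 0).trans
    (List.foldl_map.trans
      (PySem.List.foldl_congr_mem c _ _ 0 (fun acc i _ => term_eq a acc (PySem.List.pyGetD b i ""))))

-- characterisation of the binary-search boundary: under the loop invariant, the result is the
-- boundary index separating the pred-true prefix from the pred-false suffix
lemma pvBoundary_char (s : List String) (pred : String → Bool)
    (hmono : ∀ (i j : Nat) (hi : i < s.length) (hj : j < s.length),
      i ≤ j → pred s[j] = true → pred s[i] = true) :
    ∀ (lo hi : Int), 0 ≤ lo → lo ≤ hi → hi ≤ (s.length : Int) →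
    (∀ (j : Nat) (hj : j < s.length), (j : Int) < lo → pred s[j] = true) →
    (∀ (j : Nat) (hj : j < s.length), hi ≤ (j : Int) → pred s[j] = false) →
    ∃ k : Nat, pvBoundary s pred lo hi = (k : Int) ∧ k ≤ s.length ∧
      (∀ (j : Nat) (hj : j < s.length), (j < k ↔ pred s[j] = true)) := by
  intro lo hi
  induction lo, hi using pvBoundary.induct s pred with
  | case1 lo hi h mid hp ih =>
    intro h0 _ hlen hbelow habove
    have hm := PySem.Int.floordiv_two_mid_bounds (le_of_lt h)
    have hmlt : mid < hi := (PySem.Int.floordiv_lt_iff_lt_mul (by norm_num)).mpr (by omega)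
    have hmid_lt : mid.toNat < s.length := by omega
    have hget : PySem.List.pyGetD s mid "" = s[mid.toNat] := by
      rw [PySem.List.pyGetD_of_nonneg s "" (by omega)]
      simp [hmid_lt]
    rw [pvBoundary, dif_pos h, if_pos hp]
    exact ih (by omega) (by omega) hlen
      (fun j hj hjlo => hmono j mid.toNat hj hmid_lt (by omega) (hget ▸ hp))
      habove
  | case2 lo hi h mid hp ih =>
    intro h0 _ hlen hbelow habove
    have hm := PySem.Int.floordiv_two_mid_bounds (le_of_lt h)
    have hmlt : mid < hi := (PySem.Int.floordiv_lt_iff_lt_mul (by norm_num)).mpr (by omega)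
    have hmid_lt : mid.toNat < s.length := by omega
    have hget : PySem.List.pyGetD s mid "" = s[mid.toNat] := by
      rw [PySem.List.pyGetD_of_nonneg s "" (by omega)]
      simp [hmid_lt]
    rw [pvBoundary, dif_pos h, if_neg hp]
    refine ih h0 (by omega) (by omega) hbelow ?_
    intro j hj hmj
    by_contra hc
    have hjt : pred s[j] = true := by
      cases hcc : pred s[j] with
      | true => rfl
      | false => exact absurd hcc hc
    have := hmono mid.toNat j hmid_lt hj (by omega) hjt
    rw [hget] at hp
    exact absurd this (by simp [hp])
  | case3 lo hi h =>
    intro h0 hlh hlen hbelow habove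
    rw [pvBoundary, dif_neg h]
    refine ⟨lo.toNat, by omega, by omega, ?_⟩
    intro j hj
    constructor
    · intro hjk; exact hbelow j hj (by omega)
    · intro hjt
      by_contra hc
      have := habove j hj (by omega)
      rw [hjt] at this; exact Bool.true_eq_false.mp this

-- a boundary characterisation determines countP
lemma countP_of_boundary (s : List String) (pred : String → Bool) (k : Nat)
    (hk : k ≤ s.length)
    (h : ∀ (j : Nat) (hj : j < s.length), (j < k ↔ pred s[j] = true)) :
    s.countP pred = k := by
  induction s generalizing k with
  | nil =>
    simp only [List.length_nil, Nat.le_zero] at hk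
    simp [hk]
  | cons x t ih =>
    cases k with
    | zero =>
      rw [List.countP_eq_zero.mpr]; intro y hy
      obtain ⟨j, hj, rfl⟩ := List.mem_iff_getElem.mp hy
      simp [(h j hj).not.mp (by omega)]
    | succ k =>
      have hx : pred x = true := (h 0 (by simp)).mp (by omega)
      have hk' : k ≤ t.length := by simpa using hk
      have ht : t.countP pred = k := ih k hk' (fun j hj => by
        have := h (j + 1) (by simpa using hj)
        simpa using this)
      rw [List.countP_cons, hx, ht]
      simp

-- countP(≤ v) splits into countP(< v) plus the multiplicity of v (any list, by trichotomy)
lemma countP_le_split (s : List String) (v : String) :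
    s.countP (fun x => decide (x ≤ v)) = s.countP (fun x => decide (x < v)) + s.count v := by
  induction s with
  | nil => simp
  | cons x t iht =>
    simp only [List.countP_cons, List.count_cons, iht]
    rcases lt_trichotomy x v with hxv | rfl | hxv
    · rw [decide_eq_true (le_of_lt hxv), decide_eq_true hxv,
        beq_eq_false_iff_ne.mpr (ne_of_lt hxv)]
      simp; omega
    · rw [decide_eq_true le_rfl, decide_eq_false (lt_irrefl _), BEq.rfl]
      simp; omega
    · rw [decide_eq_false (not_le.mpr hxv), decide_eq_false (not_lt.mpr (le_of_lt hxv)),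
        beq_eq_false_iff_ne.mpr (ne_of_gt hxv)]
      simp

-- the per-query difference of the two binary-search boundaries is a.count(v)
lemma boundary_diff_eq_count (a : List String) (v : String) :
    pvBoundary (PySem.List.sorted a (fun x => x)) (fun x => decide (x ≤ v)) 0
        ((PySem.List.sorted a (fun x => x)).length : Int)
      - pvBoundary (PySem.List.sorted a (fun x => x)) (fun x => decide (x < v)) 0
        ((PySem.List.sorted a (fun x => x)).length : Int)
      = (PySem.List.count a v : Int) := by
  set s := PySem.List.sorted a (fun x => x) with hs
  have hsp : List.Pairwise (fun x y => x ≤ y) s := PySem.List.sorted_pairwise a (fun x => x)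
  have hmono : ∀ (p : String → Bool), (∀ x y : String, x ≤ y → p y = true → p x = true) →
      ∀ (i j : Nat) (hi : i < s.length) (hj : j < s.length), i ≤ j → p s[j] = true → p s[i] = true := by
    intro p hp i j hi hj hij hjt
    rcases Nat.eq_or_lt_of_le hij with rfl | hlt
    · exact hjt
    · exact hp _ _ (List.pairwise_iff_getElem.mp hsp i j hi hj hlt) hjt
  obtain ⟨kle, hkle, hkle_len, hle⟩ :=
    pvBoundary_char s (fun x => decide (x ≤ v))
      (hmono _ (fun x y hxy h => decide_eq_true (le_trans hxy (of_decide_eq_true h))))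
      0 (s.length : Int) le_rfl (by omega) le_rfl
      (fun j hj hlt => by omega) (fun j hj hge => by omega)
  obtain ⟨klt, hklt, hklt_len, hlt⟩ :=
    pvBoundary_char s (fun x => decide (x < v))
      (hmono _ (fun x y hxy h => decide_eq_true (lt_of_le_of_lt hxy (of_decide_eq_true h))))
      0 (s.length : Int) le_rfl (by omega) le_rfl
      (fun j hj hl => by omega) (fun j hj hge => by omega)
  rw [hkle, hklt]
  have hc1 : s.countP (fun x => decide (x ≤ v)) = kle := countP_of_boundary _ _ _ hkle_len hle
  have hc2 : s.countP (fun x => decide (x < v)) = klt := countP_of_boundary _ _ _ hklt_len hlt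
  have hsplit := countP_le_split s v
  have hcount : s.count v = List.count v a :=
    List.Perm.count_eq (PySem.List.sorted_perm a (fun x => x) false) v
  rw [PySem.List.count_eq]
  omega

-- ===== VERDICT (by name: the statement is the Claim_ definition above) =====
theorem bobAndIndices_spec : Claim_equal_bobAndIndices := by
  intro a b c _ _
  show bobAndIndices a b c = bobAndIndices_alt a b c
  rw [a_eq_foldl_count]
  refine PySem.List.foldl_congr_mem c _ _ 0 ?_
  intro acc i _
  show acc + (PySem.List.count a (PySem.List.pyGetD b i "") : Int)
      = acc + (pvBoundary (PySem.List.sorted a (fun x => x))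
          (fun x => decide (x ≤ PySem.List.pyGetD b i "")) 0
          ((PySem.List.sorted a (fun x => x)).length : Int)
        - pvBoundary (PySem.List.sorted a (fun x => x))
          (fun x => decide (x < PySem.List.pyGetD b i "")) 0
          ((PySem.List.sorted a (fun x => x)).length : Int))
  rw [boundary_diff_eq_count]
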